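-- pv_equiv track=rewrite | github.com/ppatali/AdventCode2021 | day10.py | ComputeAutoCompletWinner
-- ===== SOURCE A (Python) =====
-- from typing import List, Tuple, Dict, Set
--
-- INCOMPLETE_POINTS = {")": 1, "]": 2, "}": 3, ">": 4}
--
-- def ComputeAutoCompletWinner(autocompletes: List[str]):
--     scores = []
--     for line in autocompletes:
--         score = 0
--         for c in line:
--             score = 5 * score + INCOMPLETE_POINTS[c]
--         scores.append(score)
--     scores.sort()
--     return scores[len(scores) >> 1]
-- ===== SOURCE B (Python) =====
-- INCOMPLETE_POINTS = {")": 1, "]": 2, "}": 3, ">": 4}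
--
-- def ComputeAutoCompletWinner(autocompletes):
--     scores = []
--     for line in autocompletes:
--         score = 0
--         for c in line:
--             score = 5 * score + INCOMPLETE_POINTS[c]
--         scores.append(score)
--     # quickselect the element of rank k = len(scores) >> 1 (0-based, ascending)
--     k = len(scores) >> 1
--     xs = scores
--     while True:
--         p = xs[0]
--         less = [x for x in xs if x < p]
--         if k < len(less):
--             xs = less
--             continue
--         nle = sum(1 for x in xs if x <= p)
--         if k < nle:
--             return p
--         k -= nle
--         xs = [x for x in xs if x > p]
-- ===== Notes on version B (the rewrite author's own statement) =====
-- stated objective: alternative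
-- what changed: The final full sort followed by indexing the middle element is replaced by an iterative three-way-partition quickselect that finds the element of rank len(scores)>>1 directly, without ever sorting the score list.
import Mathlib
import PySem

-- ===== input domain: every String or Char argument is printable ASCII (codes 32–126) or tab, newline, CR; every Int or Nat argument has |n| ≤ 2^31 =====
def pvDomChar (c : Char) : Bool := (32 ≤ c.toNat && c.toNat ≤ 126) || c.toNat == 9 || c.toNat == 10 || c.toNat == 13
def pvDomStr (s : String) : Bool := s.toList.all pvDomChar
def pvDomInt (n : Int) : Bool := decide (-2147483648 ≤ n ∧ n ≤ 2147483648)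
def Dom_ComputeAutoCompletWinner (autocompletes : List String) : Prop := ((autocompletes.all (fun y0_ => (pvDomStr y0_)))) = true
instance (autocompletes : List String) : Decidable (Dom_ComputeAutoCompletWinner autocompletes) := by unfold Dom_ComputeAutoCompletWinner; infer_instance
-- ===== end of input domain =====

-- B replaces A's final full sort + middle index by an iterative three-way quickselect
-- of the element of rank len(scores) >> 1 (objective: alternative algorithm, same results).


-- ===== PORT A =====
def pvPoints : PySem.Dict Char Int :=
  PySem.Dict.ofList [(')', 1), (']', 2), ('}', 3), ('>', 4)]

-- INCOMPLETE_POINTS[c] raises KeyError on other chars; Pre_ excludes those, so getD 0 is exact on Pre_.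
def ComputeAutoCompletWinner (autocompletes : List String) : Int :=
  let scores := autocompletes.foldl
    (fun scores line =>
      scores ++ [line.toList.foldl (fun score c => 5 * score + pvPoints.getD c 0) 0]) []
  let ss := PySem.List.sorted scores (fun x => x) false
  (PySem.List.pyGet? ss ((scores.length >>> 1 : Nat) : Int)).getD 0

-- ===== PORT B =====
-- iterative quickselect from Source B (the 'while True' loop; the [] case is unreachable under Pre_)
def pvQsel (xs : List Int) (k : Nat) : Int :=
  match xs with
  | [] => 0
  | p :: t =>
    let less := (p :: t).filter (fun x => decide (x < p))
    if k < less.length then pvQsel less k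
    else
      let nle := ((p :: t).filter (fun x => decide (x ≤ p))).length
      if k < nle then p
      else pvQsel ((p :: t).filter (fun x => decide (p < x))) (k - nle)
termination_by xs.length
decreasing_by
  · exact List.length_filter_lt_length_iff_exists.mpr ⟨p, List.mem_cons_self, by simp⟩
  · exact List.length_filter_lt_length_iff_exists.mpr ⟨p, List.mem_cons_self, by simp⟩

def ComputeAutoCompletWinner_alt (autocompletes : List String) : Int :=
  let scores := autocompletes.foldl
    (fun scores line =>
      scores ++ [line.toList.foldl (fun score c => 5 * score + pvPoints.getD c 0) 0]) []
  pvQsel scores (scores.length >>> 1)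

-- ===== PRECONDITION & SPEC =====
-- Pre_ excludes exactly the inputs where Python A raises: the empty list (IndexError on
-- scores[0 >> 1]) and lines containing a character outside ")]}>"  (KeyError).
def Pre_ComputeAutoCompletWinner (autocompletes : List String) : Prop :=
  autocompletes ≠ [] ∧
    (autocompletes.all (fun s => s.toList.all (fun c => c ∈ [')', ']', '}', '>']))) = true
instance (autocompletes : List String) : Decidable (Pre_ComputeAutoCompletWinner autocompletes) := by
  unfold Pre_ComputeAutoCompletWinner; infer_instance

def pvWitness_ComputeAutoCompletWinner : List String := [")]", ">"]

def Spec_ComputeAutoCompletWinner (autocompletes : List String) (out : Int) : Prop := out = ComputeAutoCompletWinner_alt autocompletes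
instance (autocompletes : List String) (out : Int) : Decidable (Spec_ComputeAutoCompletWinner autocompletes out) := by unfold Spec_ComputeAutoCompletWinner; infer_instance

-- ===== CLAIM (what is proved, stated in full; the proofs are below) =====
def Claim_equal_ComputeAutoCompletWinner : Prop := ∀ (autocompletes : List String), Dom_ComputeAutoCompletWinner autocompletes → Pre_ComputeAutoCompletWinner autocompletes → Spec_ComputeAutoCompletWinner autocompletes (ComputeAutoCompletWinner autocompletes)

-- ===== LEMMAS AND PROOFS =====

lemma pv_nle_split (p : Int) (xs : List Int) :
    (xs.filter (fun x => decide (x ≤ p))).length =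
      (xs.filter (fun x => decide (x < p))).length + (xs.filter (fun x => x == p)).length := by
  induction xs with
  | nil => simp
  | cons a t ih =>
    rcases lt_trichotomy a p with h | h | h
    · rw [List.filter_cons, List.filter_cons, List.filter_cons,
        if_pos (decide_eq_true h.le), if_pos (decide_eq_true h),
        if_neg (by simp [beq_eq_false_iff_ne.mpr h.ne])]
      simp only [List.length_cons]; omega
    · subst h
      rw [List.filter_cons, List.filter_cons, List.filter_cons,
        if_pos (decide_eq_true le_rfl), if_neg (by simp),
        if_pos (by simp)]
      simp only [List.length_cons]; omega
    · rw [List.filter_cons, List.filter_cons, List.filter_cons,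
        if_neg (by simp; omega), if_neg (by simp; omega),
        if_neg (by simp [beq_eq_false_iff_ne.mpr h.ne'])]
      omega

lemma pv_perm_split (p : Int) (xs : List Int) :
    (xs.filter (fun x => decide (x < p)) ++ (xs.filter (fun x => x == p)
      ++ xs.filter (fun x => decide (p < x)))).Perm xs := by
  have h1 : (xs.filter (fun x => decide (x < p)) ++
      xs.filter (fun x => !decide (x < p))).Perm xs := List.filter_append_perm _ xs
  have h2 : ((xs.filter (fun x => !decide (x < p))).filter (fun x => x == p) ++
      (xs.filter (fun x => !decide (x < p))).filter (fun x => !(x == p))).Perm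
        (xs.filter (fun x => !decide (x < p))) := List.filter_append_perm _ _
  have e1 : (xs.filter (fun x => !decide (x < p))).filter (fun x => x == p)
      = xs.filter (fun x => x == p) := by
    rw [List.filter_filter]
    apply List.filter_congr
    intro x _
    rcases lt_trichotomy x p with h | h | h
    · simp [beq_eq_false_iff_ne.mpr h.ne]
    · simp [h]
    · simp [beq_eq_false_iff_ne.mpr h.ne']
  have e2 : (xs.filter (fun x => !decide (x < p))).filter (fun x => !(x == p))
      = xs.filter (fun x => decide (p < x)) := by
    rw [List.filter_filter]
    apply List.filter_congr
    intro x _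
    rcases lt_trichotomy x p with h | h | h
    · simp [h, not_lt_of_gt h]
    · simp [h]
    · simp [beq_eq_false_iff_ne.mpr h.ne', h, not_lt_of_gt h]
  rw [e1, e2] at h2
  exact (List.Perm.append_left _ h2).trans h1

lemma pv_sorted_decomp (p : Int) (xs : List Int) :
    PySem.List.sorted xs (fun x => x) false =
      PySem.List.sorted (xs.filter (fun x => decide (x < p))) (fun x => x) false
      ++ (xs.filter (fun x => x == p)
      ++ PySem.List.sorted (xs.filter (fun x => decide (p < x))) (fun x => x) false) := by
  apply PySem.List.sorted_id_eq_of_perm_of_pairwise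
  · -- permutation
    refine List.Perm.trans ?_ (pv_perm_split p xs)
    exact List.Perm.append (PySem.List.sorted_perm _ _ _)
      (List.Perm.append_left _ (PySem.List.sorted_perm _ _ _))
  · -- pairwise ≤
    have memL : ∀ x ∈ PySem.List.sorted (xs.filter (fun x => decide (x < p))) (fun x => x) false,
        x < p := by
      intro x hx
      rw [PySem.List.mem_sorted] at hx
      simpa using (List.mem_filter.mp hx).2
    have memE : ∀ x ∈ xs.filter (fun x => x == p), x = p := by
      intro x hx
      simpa using (List.mem_filter.mp hx).2
    have memG : ∀ x ∈ PySem.List.sorted (xs.filter (fun x => decide (p < x))) (fun x => x) false,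
        p < x := by
      intro x hx
      rw [PySem.List.mem_sorted] at hx
      simpa using (List.mem_filter.mp hx).2
    rw [List.pairwise_append]
    refine ⟨?_, ?_, ?_⟩
    · simpa using PySem.List.sorted_pairwise (xs.filter (fun x => decide (x < p))) (fun x => x)
    · rw [List.pairwise_append]
      refine ⟨?_, ?_, ?_⟩
      · exact List.pairwise_of_forall_mem_list (fun a ha b hb => by
          rw [memE a ha, memE b hb])
      · simpa using PySem.List.sorted_pairwise (xs.filter (fun x => decide (p < x))) (fun x => x)
      · intro a ha b hb
        exact (memE a ha ▸ (memG b hb).le)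
    · intro a ha b hb
      rcases List.mem_append.mp hb with hb | hb
      · exact (memL a ha).le.trans (memE b hb).symm.le
      · exact ((memL a ha).trans (memG b hb)).le

theorem pvQsel_eq (xs : List Int) (k : Nat) (hk : k < xs.length) :
    pvQsel xs k = (PySem.List.sorted xs (fun x => x) false).getD k 0 := by
  match xs with
  | [] => simp at hk
  | p :: t =>
    have hless : ((p :: t).filter (fun x => decide (x < p))).length < (p :: t).length :=
      List.length_filter_lt_length_iff_exists.mpr ⟨p, List.mem_cons_self, by simp⟩
    have hgt : ((p :: t).filter (fun x => decide (p < x))).length < (p :: t).length :=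
      List.length_filter_lt_length_iff_exists.mpr ⟨p, List.mem_cons_self, by simp⟩
    have hsplit := pv_nle_split p (p :: t)
    have hlen : (p :: t).length =
        ((p :: t).filter (fun x => decide (x < p))).length
        + ((p :: t).filter (fun x => x == p)).length
        + ((p :: t).filter (fun x => decide (p < x))).length := by
      have hlp := (pv_perm_split p (p :: t)).length_eq
      simp only [List.length_append] at hlp
      omega
    rw [pvQsel, pv_sorted_decomp p (p :: t)]
    by_cases h1 : k < ((p :: t).filter (fun x => decide (x < p))).length
    · rw [if_pos h1, pvQsel_eq _ k h1,
        List.getD_append _ _ _ _ (by rw [PySem.List.length_sorted]; exact h1)]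
    · rw [if_neg h1]
      have hL : (PySem.List.sorted ((p :: t).filter (fun x => decide (x < p)))
          (fun x => x) false).length = ((p :: t).filter (fun x => decide (x < p))).length :=
        PySem.List.length_sorted _ _ _
      by_cases h2 : k < ((p :: t).filter (fun x => decide (x ≤ p))).length
      · rw [if_pos h2]
        rw [List.getD_append_right _ _ _ _ (by omega)]
        have hkE : k - (PySem.List.sorted ((p :: t).filter (fun x => decide (x < p)))
            (fun x => x) false).length < ((p :: t).filter (fun x => x == p)).length := by
          omega
        rw [List.getD_append _ _ _ _ hkE, List.getD_eq_getElem _ _ hkE]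
        have := List.getElem_mem hkE
        have : (((p :: t).filter (fun x => x == p))[k - (PySem.List.sorted
            ((p :: t).filter (fun x => decide (x < p))) (fun x => x) false).length]'hkE) = p := by
          have hm := List.getElem_mem hkE
          simpa using (List.mem_filter.mp hm).2
        omega
      · rw [if_neg h2]
        have hk' : k - ((p :: t).filter (fun x => decide (x ≤ p))).length
            < ((p :: t).filter (fun x => decide (p < x))).length := by
          simp only [List.length_cons] at hk hlen; omega
        rw [pvQsel_eq _ _ hk']
        rw [List.getD_append_right _ _ _ _ (by omega),
          List.getD_append_right _ _ _ _ (by rw [hL]; omega)]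
        congr 1
        rw [hL]
        omega
termination_by xs.length
decreasing_by
  · exact hless
  · exact hgt

-- ===== VERDICT (by name: the statement is the Claim_ definition above) =====
theorem ComputeAutoCompletWinner_spec : Claim_equal_ComputeAutoCompletWinner := by
  intro autocompletes _ hpre
  unfold Spec_ComputeAutoCompletWinner ComputeAutoCompletWinner ComputeAutoCompletWinner_alt
  simp only [PySem.List.foldl_append_singleton_eq_map, List.nil_append]
  set f : String → Int :=
    fun line => line.toList.foldl (fun score c => 5 * score + pvPoints.getD c 0) 0 with hf
  have hne : autocompletes.map f ≠ [] := by
    simpa using hpre.1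
  have hpos : 0 < (autocompletes.map f).length := List.length_pos_iff.mpr hne
  have hklt : (autocompletes.map f).length >>> 1 < (autocompletes.map f).length := by
    rw [Nat.shiftRight_one]; omega
  rw [pvQsel_eq _ _ hklt]
  have hslen : (autocompletes.map f).length >>> 1 <
      (PySem.List.sorted (autocompletes.map f) (fun x => x) false).length := by
    rwa [PySem.List.length_sorted]
  rw [PySem.List.pyGet?_natCast, List.getD_eq_getElem _ _ hslen,
    List.getElem?_eq_getElem hslen, Option.getD_some]
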